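-- pv_equiv track=rewrite | github.com/swtaktak/PS_Archive | BOJ 풀이/11179.py | ten_to_binary
-- ===== SOURCE A (Python) =====
-- def ten_to_binary(x):
--     x = str(x)
--     sum = 0
--     for i in range(0, len(x)):
--         cur = len(x) - i - 1
--         if x[cur] == '1':
--             sum += 2 ** i
--     return sum
-- ===== SOURCE B (Python) =====
-- def ten_to_binary(x):
--     acc = 0
--     for ch in str(x):
--         acc = acc * 2 + (1 if ch == '1' else 0)
--     return acc
-- ===== Notes on version B (the rewrite author's own statement) =====
-- stated objective: simpler
-- what changed: Replaces the reversed-index loop that computes an explicit power of two per '1'-digit with a left-to-right Horner pass keeping a doubled accumulator, with no indexing or exponentiation.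
import Mathlib
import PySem

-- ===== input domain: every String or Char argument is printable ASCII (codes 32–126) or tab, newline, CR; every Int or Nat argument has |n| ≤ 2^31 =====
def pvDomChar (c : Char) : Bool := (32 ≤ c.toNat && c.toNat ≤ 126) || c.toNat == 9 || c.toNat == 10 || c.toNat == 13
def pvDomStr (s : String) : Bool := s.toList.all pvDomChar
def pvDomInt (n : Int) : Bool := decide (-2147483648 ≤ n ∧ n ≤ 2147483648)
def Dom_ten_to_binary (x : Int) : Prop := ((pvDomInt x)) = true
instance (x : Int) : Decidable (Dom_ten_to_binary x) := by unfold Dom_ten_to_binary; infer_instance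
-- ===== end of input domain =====

-- B replaces A's reversed-index loop over str(x) (summing 2**i for each '1') with a
-- left-to-right Horner pass (acc = acc*2 + bit); objective: simpler.

-- ===== PORT A =====
def ten_to_binary (x : Int) : Int :=
  let s := PySem.Int.toChars x
  (PySem.List.pyRange 0 (s.length : Int) 1).foldl
    (fun sum i =>
      if PySem.List.pyGet? s ((s.length : Int) - i - 1) = some '1'
      then sum + 2 ^ i.toNat else sum) 0

-- ===== PORT B =====
def ten_to_binary_alt (x : Int) : Int :=
  (PySem.Int.toChars x).foldl (fun acc ch => acc * 2 + if ch = '1' then 1 else 0) 0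

-- ===== PRECONDITION & SPEC =====
def Spec_ten_to_binary (x : Int) (out : Int) : Prop := out = ten_to_binary_alt x
instance (x : Int) (out : Int) : Decidable (Spec_ten_to_binary x out) := by unfold Spec_ten_to_binary; infer_instance

-- ===== CLAIM (what is proved, stated in full; the proofs are below) =====
def Claim_equal_ten_to_binary : Prop := ∀ (x : Int), Dom_ten_to_binary x → Spec_ten_to_binary x (ten_to_binary x)

-- ===== LEMMAS AND PROOFS =====

-- Shifting the initial accumulator of the Horner fold multiplies it by 2^length.
theorem pv_horner_shift (l : List Char) (a : Int) :
    l.foldl (fun acc ch => acc * 2 + if ch = '1' then 1 else 0) a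
      = a * 2 ^ l.length + l.foldl (fun acc ch => acc * 2 + if ch = '1' then 1 else 0) 0 := by
  induction l generalizing a with
  | nil => simp
  | cons c t ih =>
    simp only [List.foldl_cons, List.length_cons]
    rw [ih (a * 2 + if c = '1' then 1 else 0), ih (0 * 2 + if c = '1' then 1 else 0)]
    ring

-- A's indexed power-sum over any character list equals B's Horner fold.
theorem pv_aFold_eq_horner (l : List Char) :
    (PySem.List.pyRange 0 (l.length : Int) 1).foldl
      (fun (sum : Int) i =>
        if PySem.List.pyGet? l ((l.length : Int) - i - 1) = some '1'
        then sum + 2 ^ i.toNat else sum) 0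
      = l.foldl (fun acc ch => acc * 2 + if ch = '1' then 1 else 0) 0 := by
  induction l with
  | nil => simp [PySem.List.pyRange_one_eq_nil]
  | cons c t ih =>
    have hlen : (((c :: t).length : Int)) = (t.length : Int) + 1 := by
      simp
    rw [hlen, PySem.List.pyRange_one_succ_right (by positivity), List.foldl_append]
    have hcongr :
        (PySem.List.pyRange 0 (t.length : Int)).foldl
          (fun (sum : Int) i =>
            if PySem.List.pyGet? (c :: t) ((t.length : Int) + 1 - i - 1) = some '1'
            then sum + 2 ^ i.toNat else sum) 0
        = (PySem.List.pyRange 0 (t.length : Int)).foldl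
          (fun (sum : Int) i =>
            if PySem.List.pyGet? t ((t.length : Int) - i - 1) = some '1'
            then sum + 2 ^ i.toNat else sum) 0 := by
      apply PySem.List.foldl_congr_mem
      intro acc i hi
      rcases PySem.List.mem_pyRange_one.mp hi with ⟨h0, hlt⟩
      have hk : ∃ k : Nat, (i : Int) = (k : Int) ∧ k < t.length := by
        refine ⟨i.toNat, by omega, by omega⟩
      rcases hk with ⟨k, hik, hklt⟩
      have h1 : (t.length : Int) + 1 - i - 1 = ((t.length - 1 - k : Nat) : Int) + 1 := by omega
      have h2 : (t.length : Int) - i - 1 = ((t.length - 1 - k : Nat) : Int) := by omega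
      rw [h1, h2, PySem.List.pyGet?_cons_succ]
    rw [hcongr, ih]
    have hlast : PySem.List.pyGet? (c :: t) ((t.length : Int) + 1 - (t.length : Int) - 1)
        = some c := by
      have : (t.length : Int) + 1 - (t.length : Int) - 1 = 0 := by omega
      rw [this, PySem.List.pyGet?_zero_cons]
    simp only [List.foldl, hlast]
    rw [pv_horner_shift t (0 * 2 + if c = '1' then 1 else 0)]
    have htn : ((t.length : Int)).toNat = t.length := by omega
    by_cases hc : c = '1' <;> simp [hc, htn] <;> try ring

-- ===== VERDICT (by name: the statement is the Claim_ definition above) =====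
theorem ten_to_binary_spec : Claim_equal_ten_to_binary := by
  intro x _
  show ten_to_binary x = ten_to_binary_alt x
  simp only [ten_to_binary, ten_to_binary_alt]
  exact pv_aFold_eq_horner (PySem.Int.toChars x)
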